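-- pv_equiv track=rewrite | github.com/polmki123/SONMAT_DEEP | Deep_model/Test.py | Slice_test_datalist
-- ===== SOURCE A (Python) =====
-- def chunker(seq, size):
--     return (seq[pos:pos + size] for pos in range(0, len(seq), size))
--
-- def Slice_test_datalist(test_datalist, test_label_datalist):
--     Test_Concat_datalist = []
--     for i in range(len(test_datalist)):
--         Test_Concat_datalist.append([test_datalist[i], test_label_datalist[i]])
--     Test_Concat_data_tolist = []
--     for group in chunker(Test_Concat_datalist, 8):
--         Test_Concat_data_tolist.append(group)
--
--     return Test_Concat_data_tolist
-- ===== SOURCE B (Python) =====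
-- def Slice_test_datalist(test_datalist, test_label_datalist):
--     result = []
--     group = []
--     for i in range(len(test_datalist)):
--         group.append([test_datalist[i], test_label_datalist[i]])
--         if len(group) == 8:
--             result.append(group)
--             group = []
--     if group:
--         result.append(group)
--     return result
-- ===== Notes on version B (the rewrite author's own statement) =====
-- stated objective: alternative
-- what changed: B fuses pairing and chunking into a single indexed pass that maintains a current group of up to 8 pairs and flushes it when full (plus a non-empty trailing group), instead of building the whole pairs list and then slicing it at positions 0,8,16,... like A.
import Mathlib
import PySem

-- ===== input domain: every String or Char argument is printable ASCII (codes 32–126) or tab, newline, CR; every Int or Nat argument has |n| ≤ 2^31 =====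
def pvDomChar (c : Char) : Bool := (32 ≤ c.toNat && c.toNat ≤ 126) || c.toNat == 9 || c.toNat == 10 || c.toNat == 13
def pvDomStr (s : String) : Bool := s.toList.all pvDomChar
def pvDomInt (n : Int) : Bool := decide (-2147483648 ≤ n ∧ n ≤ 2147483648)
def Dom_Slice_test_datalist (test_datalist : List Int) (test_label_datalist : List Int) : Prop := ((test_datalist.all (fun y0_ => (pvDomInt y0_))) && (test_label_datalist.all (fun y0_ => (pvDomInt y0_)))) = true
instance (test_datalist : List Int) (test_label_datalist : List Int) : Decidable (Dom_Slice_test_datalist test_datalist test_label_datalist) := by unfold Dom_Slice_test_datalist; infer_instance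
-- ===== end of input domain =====

-- B fuses pairing and chunking into one pass with a running group of up to 8 (alternative decomposition, same O(n) cost);
-- equivalence is proved on inputs where the label list is at least as long as the data list (elsewhere both Pythons raise IndexError).

-- ===== PORT A =====
-- helper chunker(seq, size): the list of slices seq[pos:pos+size] for pos in range(0, len(seq), size)
def pvChunker (seq : List (List Int)) (size : Int) : List (List (List Int)) :=
  (PySem.List.pyRange 0 (seq.length : Int) size).map
    (fun pos => PySem.List.slice seq (some pos) (some (pos + size)))

def Slice_test_datalist (test_datalist : List Int) (test_label_datalist : List Int) : List (List (List Int)) :=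
  -- first loop: build the full pairs list
  let concat := (PySem.List.pyRange 0 (test_datalist.length : Int) 1).foldl
    (fun acc i => acc ++ [[PySem.List.pyGetD test_datalist i 0, PySem.List.pyGetD test_label_datalist i 0]]) []
  -- second loop: append each chunk of 8
  (pvChunker concat 8).foldl (fun acc group => acc ++ [group]) []

-- ===== PORT B =====
-- one step of B's fused loop: add the pair to the current group, flush it when it reaches 8
def pvStep (st : List (List (List Int)) × List (List Int)) (pair : List Int) :
    List (List (List Int)) × List (List Int) :=
  let g := st.2 ++ [pair]
  if g.length = 8 then (st.1 ++ [g], []) else (st.1, g)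

def Slice_test_datalist_alt (test_datalist : List Int) (test_label_datalist : List Int) : List (List (List Int)) :=
  let st := (PySem.List.pyRange 0 (test_datalist.length : Int) 1).foldl
    (fun st i => pvStep st [PySem.List.pyGetD test_datalist i 0, PySem.List.pyGetD test_label_datalist i 0])
    ([], [])
  if st.2 = [] then st.1 else st.1 ++ [st.2]

-- ===== PRECONDITION & SPEC =====
-- Pre_: the label list must be at least as long as the data list; otherwise Python A raises IndexError at l[i].
def Pre_Slice_test_datalist (test_datalist : List Int) (test_label_datalist : List Int) : Prop :=
  test_datalist.length ≤ test_label_datalist.length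
instance (test_datalist : List Int) (test_label_datalist : List Int) : Decidable (Pre_Slice_test_datalist test_datalist test_label_datalist) := by unfold Pre_Slice_test_datalist; infer_instance

def pvWitness_Slice_test_datalist : List Int × List Int := ([1, 2, 3], [4, 5, 6])

def Spec_Slice_test_datalist (test_datalist : List Int) (test_label_datalist : List Int) (out : List (List (List Int))) : Prop := out = Slice_test_datalist_alt test_datalist test_label_datalist
instance (test_datalist : List Int) (test_label_datalist : List Int) (out : List (List (List Int))) : Decidable (Spec_Slice_test_datalist test_datalist test_label_datalist out) := by unfold Spec_Slice_test_datalist; infer_instance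

-- ===== CLAIM (what is proved, stated in full; the proofs are below) =====
def Claim_equal_Slice_test_datalist : Prop := ∀ (test_datalist : List Int) (test_label_datalist : List Int), Dom_Slice_test_datalist test_datalist test_label_datalist → Pre_Slice_test_datalist test_datalist test_label_datalist → Spec_Slice_test_datalist test_datalist test_label_datalist (Slice_test_datalist test_datalist test_label_datalist)

-- ===== LEMMAS AND PROOFS =====

-- reference chunking: split a list into consecutive groups of 8 (last one possibly shorter)
def pvChunks8 (xs : List (List Int)) : List (List (List Int)) :=
  if h : xs = [] then [] else xs.take 8 :: pvChunks8 (xs.drop 8)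
termination_by xs.length
decreasing_by
  have : 0 < xs.length := List.length_pos_of_ne_nil h
  simp [List.length_drop]; omega

-- B's post-loop flush, as a function (defeq to the if-expression in the port)
def pvFlush (st : List (List (List Int)) × List (List Int)) : List (List (List Int)) :=
  if st.2 = [] then st.1 else st.1 ++ [st.2]

-- A's chunker with size 8 is exactly pvChunks8
theorem pvChunker_eq_chunks8 (P : List (List Int)) : pvChunker P 8 = pvChunks8 P := by
  have hrm : pvChunker P 8 =
      (List.range ((P.length + 7) / 8)).map (fun k => (P.drop (8 * k)).take 8) := by
    unfold pvChunker
    rw [PySem.List.pyRange_of_pos 0 (P.length : Int) (by norm_num)]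
    rw [List.map_map]
    by_cases h0 : (0 : Int) < (P.length : Int)
    · have hn : (((P.length : Int) - 0 + 8 - 1) / 8).toNat = (P.length + 7) / 8 := by
        omega
      rw [if_pos h0, hn]
      apply List.map_congr_left
      intro k _
      show PySem.List.slice P (some (0 + 8 * (k : Int))) (some (0 + 8 * (k : Int) + 8)) = _
      have h1 : (0 + 8 * (k : Int)) = ((8 * k : Nat) : Int) := by push_cast; ring
      rw [h1]
      exact_mod_cast PySem.List.slice_natCast_add P (8 * k) 8
    · have hP : P.length = 0 := by omega
      rw [if_neg h0]
      simp [hP]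
  rw [hrm]
  clear hrm
  induction P using pvChunks8.induct with
  | case1 => simp [pvChunks8]
  | case2 xs h ih =>
    have hlen : 0 < xs.length := List.length_pos_of_ne_nil h
    rw [pvChunks8, dif_neg h]
    have hm : (xs.length + 7) / 8 = ((xs.drop 8).length + 7) / 8 + 1 := by
      simp [List.length_drop]; omega
    rw [hm, List.range_succ_eq_map, List.map_cons, List.map_map]
    simp only [Nat.mul_zero, List.drop_zero]
    congr 1
    rw [← ih]
    apply List.map_congr_left
    intro k _
    simp only [Function.comp_apply, List.drop_drop]
    congr 2
    omega

-- B's fused fold with a partial group g (length < 8) produces res ++ chunks of (g ++ P)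
theorem pvStep_foldl_eq (P : List (List Int)) : ∀ (res : List (List (List Int)))
    (g : List (List Int)), g.length < 8 →
    pvFlush (P.foldl pvStep (res, g)) = res ++ pvChunks8 (g ++ P) := by
  induction P with
  | nil =>
    intro res g hg
    by_cases hgnil : g = []
    · subst hgnil; simp [pvFlush, pvChunks8]
    · simp only [List.foldl_nil, List.append_nil]
      rw [pvFlush, if_neg hgnil, pvChunks8, dif_neg hgnil]
      rw [List.take_of_length_le (by omega), List.drop_eq_nil_of_le (by omega)]
      simp [pvChunks8]
  | cons p P ih =>
    intro res g hg
    simp only [List.foldl_cons]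
    by_cases h8 : (g ++ [p]).length = 8
    · have hlen8 : g.length + 1 = 8 := by simpa using h8
      have hstep : pvStep (res, g) p = (res ++ [g ++ [p]], []) := by
        simp [pvStep, hlen8]
      rw [hstep, ih (res ++ [g ++ [p]]) [] (by norm_num)]
      simp only [List.nil_append]
      have hne : g ++ p :: P ≠ [] := by simp
      conv_rhs => rw [pvChunks8]
      rw [dif_neg hne]
      have hgp : g ++ p :: P = (g ++ [p]) ++ P := by simp
      rw [hgp, List.take_append_of_le_length (by omega), List.drop_append_of_le_length (by omega)]
      rw [List.take_of_length_le (by omega), List.drop_eq_nil_of_le (by omega)]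
      simp
    · have hlen8 : g.length + 1 ≠ 8 := by simpa using h8
      have hstep : pvStep (res, g) p = (res, g ++ [p]) := by
        simp [pvStep, hlen8]
      rw [hstep, ih res (g ++ [p]) (by simp; omega)]
      congr 2
      simp

-- ===== VERDICT (by name: the statement is the Claim_ definition above) =====
theorem Slice_test_datalist_spec : Claim_equal_Slice_test_datalist := by
  intro d l _ _
  show Slice_test_datalist d l = Slice_test_datalist_alt d l
  unfold Slice_test_datalist Slice_test_datalist_alt
  rw [PySem.List.foldl_append_singleton_eq_map
        (fun i => [PySem.List.pyGetD d i 0, PySem.List.pyGetD l i 0])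
        (PySem.List.pyRange 0 (d.length : Int) 1) [],
      PySem.List.foldl_append_singleton]
  simp only [List.nil_append]
  set P := (PySem.List.pyRange 0 (d.length : Int) 1).map
    (fun i => [PySem.List.pyGetD d i 0, PySem.List.pyGetD l i 0]) with hP
  rw [pvChunker_eq_chunks8]
  show pvChunks8 P = pvFlush ((PySem.List.pyRange 0 (d.length : Int) 1).foldl
    (fun st i => pvStep st [PySem.List.pyGetD d i 0, PySem.List.pyGetD l i 0]) ([], []))
  rw [show ((PySem.List.pyRange 0 (d.length : Int) 1).foldl
      (fun st i => pvStep st [PySem.List.pyGetD d i 0, PySem.List.pyGetD l i 0]) ([], [])) =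
      P.foldl pvStep ([], []) by rw [hP, List.foldl_map]]
  rw [pvStep_foldl_eq P [] [] (by norm_num)]
  simp
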